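-- pv_equiv track=rewrite | github.com/ZiningYuan/ICBSFinTech | DataStr&Algo_Python/hw01.py | comparison_function
-- ===== SOURCE A (Python) =====
-- def comparison_function(value):
--     """
--     Comparison function for counting_sort
--
--     Parameter:
--         value - integer
--
--     Returns:
--         ??? such that comparisons of return values work as described
--
--     Example use:
--     >>> comparison_function(99) > comparison_function(18783479)
--     True
--     >>> comparison_function(123) > comparison_function(321)
--     False
--     >>> comparison_function(1789) > comparison_function(96861)
--     True
--     """
--     value_str = str(value)
--     num_digits = []
--
--     def count_digit(value,int):
--         # input: value - a string, int - an integer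
--         cnt = 0
--         for i in value:
--             if i == str(int):
--                 cnt+= 1
--             else:
--                 pass
--         return cnt
--
--     for num in reversed(range(10)):
--         num_digit = count_digit(value_str, num)
--         num_digits.append(num_digit)
--
--     norm = int(value_str)
--
--     return (num_digits, norm)
-- ===== SOURCE B (Python) =====
-- def comparison_function(value):
--     # Digit frequencies are extracted arithmetically from |value| by repeated
--     # divmod-by-10 into a 10-bucket array (no character scanning at all);
--     # norm is computed as in A.
--     value_str = str(value)
--     counts = [0] * 10
--     n = abs(value)
--     if n == 0:
--         counts[0] = 1
--     while n:
--         counts[n % 10] += 1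
--         n //= 10
--     return (counts[::-1], int(value_str))
-- ===== Notes on version B (the rewrite author's own statement) =====
-- stated objective: alternative
-- what changed: B extracts digit frequencies arithmetically from abs(value) by a single divmod-by-ten loop into a ten-bucket array (no character scanning), then reverses the buckets for the nine-down-to-zero order, instead of A's ten separate character-equality scans of str(value); the norm int(str(value)) is computed as in A.
import Mathlib
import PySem

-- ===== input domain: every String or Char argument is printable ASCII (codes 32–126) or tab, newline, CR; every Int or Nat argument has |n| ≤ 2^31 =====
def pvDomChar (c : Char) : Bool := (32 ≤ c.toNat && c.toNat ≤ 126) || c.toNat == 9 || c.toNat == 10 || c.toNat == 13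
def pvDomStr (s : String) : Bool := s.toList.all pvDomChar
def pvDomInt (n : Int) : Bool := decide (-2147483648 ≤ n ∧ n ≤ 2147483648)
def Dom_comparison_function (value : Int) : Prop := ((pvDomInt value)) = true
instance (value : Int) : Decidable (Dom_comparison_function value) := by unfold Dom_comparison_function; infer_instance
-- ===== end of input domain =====

-- B replaces A's ten per-digit scans of str(value) by arithmetic digit extraction:
-- a divmod-by-ten loop over abs(value) tallying into a ten-bucket array (objective: alternative).

-- ===== PORT A =====
-- count_digit(value, int): scan the string, comparing each 1-char string with str(int)
def cf_count_digit (s : List Char) (i : Int) : Int :=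
  s.foldl (fun cnt c => if String.ofList [c] == PySem.Int.toStr i then cnt + 1 else cnt) 0

def comparison_function (value : Int) : List Int × Int :=
  let value_str := PySem.Int.toStr value
  let num_digits :=
    ((PySem.List.pyRange 0 10 1).reverse).foldl
      (fun acc num => acc ++ [cf_count_digit value_str.toList num]) []
  -- int(value_str): always parses, since value_str = str(value); getD 0 is never taken
  let norm := (PySem.Int.ofStr? value_str).getD 0
  (num_digits, norm)

-- ===== PORT B =====
-- the while loop: counts[n % 10] += 1; n //= 10   (index n % 10 is always in range)
def cfAltLoop (n : Nat) (counts : List Int) : List Int :=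
  if h : n = 0 then counts
  else cfAltLoop (n / 10) (counts.set (n % 10) (counts.getD (n % 10) 0 + 1))
termination_by n
decreasing_by exact Nat.div_lt_self (Nat.pos_of_ne_zero h) (by norm_num)

def comparison_function_alt (value : Int) : List Int × Int :=
  let value_str := PySem.Int.toStr value
  let counts0 : List Int := List.replicate 10 0
  let n := value.natAbs          -- n = abs(value)
  let counts1 := if n = 0 then counts0.set 0 1 else counts0
  let counts := cfAltLoop n counts1
  -- counts[::-1] is the reversal; int(value_str) as in A
  (counts.reverse, (PySem.Int.ofStr? value_str).getD 0)

-- ===== PRECONDITION & SPEC =====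
def Spec_comparison_function (value : Int) (out : List Int × Int) : Prop := out = comparison_function_alt value
instance (value : Int) (out : List Int × Int) : Decidable (Spec_comparison_function value out) := by unfold Spec_comparison_function; infer_instance

-- ===== CLAIM (what is proved, stated in full; the proofs are below) =====
def Claim_equal_comparison_function : Prop := ∀ (value : Int), Dom_comparison_function value → Spec_comparison_function value (comparison_function value)

-- ===== LEMMAS AND PROOFS =====

-- the decimal digit characters of m, built by the same divmod recursion as B's loop
def natChars (m : Nat) : List Char :=
  if h : m < 10 then [Nat.digitChar m]
  else natChars (m / 10) ++ [Nat.digitChar (m % 10)]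
termination_by m
decreasing_by exact Nat.div_lt_self (by omega) (by norm_num)

-- arithmetic count of digit d among the decimal digits of m (0 for m = 0)
def adc (d : Nat) (m : Nat) : Nat :=
  if h : m = 0 then 0 else (if m % 10 = d then 1 else 0) + adc d (m / 10)
termination_by m
decreasing_by exact Nat.div_lt_self (Nat.pos_of_ne_zero h) (by norm_num)

theorem toDigitsCore_eq (f : Nat) : ∀ (m : Nat) (L : List Char), m < f →
    Nat.toDigitsCore 10 f m L = natChars m ++ L := by
  induction f with
  | zero => intro m L h; omega
  | succ f ih =>
    intro m L h
    rw [Nat.toDigitsCore]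
    by_cases h0 : m / 10 = 0
    · have hm : m < 10 := by omega
      rw [if_pos h0, natChars, dif_pos hm, Nat.mod_eq_of_lt hm]
      rfl
    · rw [if_neg h0,
        ih (m / 10) _ (Nat.lt_of_lt_of_le (Nat.div_lt_self (by omega) (by norm_num)) (by omega))]
      conv_rhs => rw [natChars, dif_neg (show ¬ m < 10 by omega)]
      simp

theorem toDigits10_eq (m : Nat) : Nat.toDigits 10 m = natChars m := by
  have := toDigitsCore_eq (m + 1) m [] (by omega)
  simpa [Nat.toDigits] using this

theorem dchar_inj : ∀ m < 10, ∀ d < 10, (Nat.digitChar m = Nat.digitChar d ↔ m = d) := by decide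

theorem dchar_ne_dash : ∀ d < 10, Nat.digitChar d ≠ '-' := by decide

theorem natChars_count (d : Nat) (hd : d < 10) :
    ∀ m, m ≠ 0 → (natChars m).count (Nat.digitChar d) = adc d m := by
  intro m
  induction m using Nat.strong_induction_on with
  | _ m ih =>
    intro hm
    by_cases h10 : m < 10
    · have hdiv : m / 10 = 0 := by omega
      rw [natChars, dif_pos h10, adc, dif_neg hm, adc, dif_pos hdiv,
        Nat.mod_eq_of_lt h10]
      simp only [List.count_cons, List.count_nil]
      have := dchar_inj m h10 d hd
      by_cases he : m = d
      · simp [he]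
      · have : ¬ (Nat.digitChar m = Nat.digitChar d) := fun hc => he (this.mp hc)
        simp [he, beq_iff_eq, this, Ne.symm]
    · rw [natChars, dif_neg h10, adc, dif_neg hm, List.count_append]
      have hq : m / 10 ≠ 0 := by omega
      rw [ih (m / 10) (Nat.div_lt_self (by omega) (by norm_num)) hq]
      have hmod : m % 10 < 10 := by omega
      have := dchar_inj (m % 10) hmod d hd
      simp only [List.count_cons, List.count_nil]
      by_cases he : m % 10 = d
      · simp [he]; omega
      · have hne : ¬ (Nat.digitChar (m % 10) = Nat.digitChar d) := fun hc => he (this.mp hc)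
        simp [he, beq_iff_eq, hne, Ne.symm]

theorem getD_set_eq (l : List Int) (j i : Nat) (x : Int) (hj : j < l.length) :
    (l.set j x).getD i 0 = if i = j then x else l.getD i 0 := by
  by_cases he : i = j
  · subst he
    simp [List.getD_eq_getElem?_getD, List.getElem?_set_self, hj]
  · simp [List.getD_eq_getElem?_getD, List.getElem?_set_ne (fun h => he h.symm), he]

theorem cfAltLoop_length : ∀ (n : Nat) (counts : List Int),
    (cfAltLoop n counts).length = counts.length := by
  intro n
  induction n using Nat.strong_induction_on with
  | _ n ih =>
    intro counts
    by_cases h : n = 0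
    · rw [cfAltLoop, dif_pos h]
    · rw [cfAltLoop, dif_neg h,
        ih (n / 10) (Nat.div_lt_self (Nat.pos_of_ne_zero h) (by norm_num))]
      simp

theorem cfAltLoop_getD (d : Nat) (hd : d < 10) :
    ∀ (n : Nat) (counts : List Int), counts.length = 10 →
    (cfAltLoop n counts).getD d 0 = counts.getD d 0 + (adc d n : Int) := by
  intro n
  induction n using Nat.strong_induction_on with
  | _ n ih =>
    intro counts hlen
    by_cases h : n = 0
    · rw [cfAltLoop, dif_pos h, adc, dif_pos h]
      simp
    · rw [cfAltLoop, dif_neg h,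
        ih (n / 10) (Nat.div_lt_self (Nat.pos_of_ne_zero h) (by norm_num)) _ (by simp [hlen]),
        getD_set_eq _ _ _ _ (by omega)]
      conv_rhs => rw [adc, dif_neg h]
      by_cases he : d = n % 10
      · rw [if_pos he, if_pos he.symm, he]
        push_cast
        ring
      · rw [if_neg he, if_neg (fun hc => he hc.symm)]
        push_cast
        ring

theorem count_foldl (s : List Char) (c : Char) (acc : Int) :
    s.foldl (fun cnt ch => if String.ofList [ch] == String.ofList [c] then cnt + 1 else cnt) acc
      = acc + (s.count c : Int) := by
  induction s generalizing acc with
  | nil => simp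
  | cons x xs ih =>
    simp only [List.foldl_cons, List.count_cons, ih]
    have hiff : (String.ofList [x] == String.ofList [c]) = (x == c) := by
      by_cases he : x = c
      · simp [he]
      · have : String.ofList [x] ≠ String.ofList [c] := by
          intro hc
          exact he (by simpa using congrArg String.toList hc)
        simp [he, this]
    rw [hiff]
    by_cases he : x = c <;> simp [he] <;> omega

theorem toStr_digit (d : Nat) (hd : d < 10) :
    PySem.Int.toStr (d : Int) = String.ofList [Nat.digitChar d] := by
  unfold PySem.Int.toStr PySem.Int.toChars
  rw [if_neg (by omega)]
  have h1 : ((d : Int)).toNat = d := by omega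
  rw [h1, toDigits10_eq, natChars, dif_pos hd]

theorem toChars_count (value : Int) (d : Nat) (hd : d < 10) :
    ((PySem.Int.toChars value).count (Nat.digitChar d) : Int)
      = (if value.natAbs = 0 then (if d = 0 then (1 : Int) else 0) else (adc d value.natAbs : Int)) := by
  unfold PySem.Int.toChars
  by_cases hv : value < 0
  · have hna : value.natAbs ≠ 0 := by omega
    rw [if_pos hv, if_neg hna]
    simp only [List.count_cons]
    have : ¬ (('-' : Char) = Nat.digitChar d) := fun hc => dchar_ne_dash d hd hc.symm
    rw [toDigits10_eq, natChars_count d hd _ hna]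
    simp [this]
  · have h1 : value.toNat = value.natAbs := by omega
    rw [if_neg hv, h1]
    by_cases h0 : value.natAbs = 0
    · rw [if_pos h0, h0]
      have : Nat.toDigits 10 0 = ['0'] := by decide
      rw [this]
      simp only [List.count_cons, List.count_nil]
      have := dchar_inj 0 (by omega) d hd
      by_cases he : d = 0
      · subst he
        simp
        decide
      · have : ¬ (('0' : Char) = Nat.digitChar d) := by
          intro hc
          exact he ((dchar_inj 0 (by omega) d hd).mp hc).symm
        simp [he, this]
    · rw [if_neg h0, toDigits10_eq, natChars_count d hd _ h0]

-- one digit bucket: A's scan count at digit d equals B's bucket d after the loop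
theorem perDigit (value : Int) (d : Nat) (hd : d < 10) :
    cf_count_digit (PySem.Int.toStr value).toList (d : Int)
      = (cfAltLoop value.natAbs
          (if value.natAbs = 0 then (List.replicate 10 (0 : Int)).set 0 1
           else List.replicate 10 0)).getD d 0 := by
  have hA : cf_count_digit (PySem.Int.toStr value).toList (d : Int)
      = ((PySem.Int.toChars value).count (Nat.digitChar d) : Int) := by
    unfold cf_count_digit
    rw [toStr_digit d hd, PySem.Int.toList_toStr]
    simpa using count_foldl (PySem.Int.toChars value) (Nat.digitChar d) 0
  rw [hA, toChars_count value d hd]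
  by_cases h0 : value.natAbs = 0
  · rw [if_pos h0, if_pos h0, h0]
    rw [cfAltLoop, dif_pos rfl]
    rw [getD_set_eq _ _ _ _ (by simp)]
    by_cases he : d = 0
    · simp [he]
    · rw [if_neg he, if_neg he]
      interval_cases d <;> rfl
  · rw [if_neg h0, if_neg h0,
      cfAltLoop_getD d hd _ _ (by simp)]
    have : (List.replicate 10 (0 : Int)).getD d 0 = 0 := by
      interval_cases d <;> rfl
    rw [this]
    ring

theorem list_len10_explicit (l : List Int) (hl : l.length = 10) :
    l = [l.getD 0 0, l.getD 1 0, l.getD 2 0, l.getD 3 0, l.getD 4 0,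
         l.getD 5 0, l.getD 6 0, l.getD 7 0, l.getD 8 0, l.getD 9 0] := by
  obtain ⟨a0, l, rfl⟩ := List.exists_of_length_succ l hl
  simp only [List.length_cons, Nat.succ_inj] at hl
  obtain ⟨a1, l, rfl⟩ := List.exists_of_length_succ l hl
  simp only [List.length_cons, Nat.succ_inj] at hl
  obtain ⟨a2, l, rfl⟩ := List.exists_of_length_succ l hl
  simp only [List.length_cons, Nat.succ_inj] at hl
  obtain ⟨a3, l, rfl⟩ := List.exists_of_length_succ l hl
  simp only [List.length_cons, Nat.succ_inj] at hl
  obtain ⟨a4, l, rfl⟩ := List.exists_of_length_succ l hl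
  simp only [List.length_cons, Nat.succ_inj] at hl
  obtain ⟨a5, l, rfl⟩ := List.exists_of_length_succ l hl
  simp only [List.length_cons, Nat.succ_inj] at hl
  obtain ⟨a6, l, rfl⟩ := List.exists_of_length_succ l hl
  simp only [List.length_cons, Nat.succ_inj] at hl
  obtain ⟨a7, l, rfl⟩ := List.exists_of_length_succ l hl
  simp only [List.length_cons, Nat.succ_inj] at hl
  obtain ⟨a8, l, rfl⟩ := List.exists_of_length_succ l hl
  simp only [List.length_cons, Nat.succ_inj] at hl
  obtain ⟨a9, l, rfl⟩ := List.exists_of_length_succ l hl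
  simp only [List.length_cons, Nat.succ_inj] at hl
  rw [List.length_eq_zero_iff] at hl
  subst hl
  rfl

-- ===== VERDICT (by name: the statement is the Claim_ definition above) =====
theorem comparison_function_spec : Claim_equal_comparison_function := by
  intro value _
  unfold Spec_comparison_function comparison_function comparison_function_alt
  have hr1 : (PySem.List.pyRange 0 10 1).reverse = [9, 8, 7, 6, 5, 4, 3, 2, 1, 0] := by decide
  simp only [hr1, List.foldl_cons, List.foldl_nil, List.nil_append, List.cons_append]
  refine Prod.ext ?_ rfl
  have hlen : (cfAltLoop value.natAbs
      (if value.natAbs = 0 then (List.replicate 10 (0 : Int)).set 0 1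
       else List.replicate 10 0)).length = 10 := by
    rw [cfAltLoop_length]
    by_cases h0 : value.natAbs = 0 <;> simp [h0]
  rw [list_len10_explicit _ hlen]
  simp only [List.reverse_cons, List.reverse_nil, List.nil_append, List.cons_append,
    List.append_nil]
  have h9 := perDigit value 9 (by omega)
  have h8 := perDigit value 8 (by omega)
  have h7 := perDigit value 7 (by omega)
  have h6 := perDigit value 6 (by omega)
  have h5 := perDigit value 5 (by omega)
  have h4 := perDigit value 4 (by omega)
  have h3 := perDigit value 3 (by omega)
  have h2 := perDigit value 2 (by omega)
  have h1 := perDigit value 1 (by omega)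
  have h0 := perDigit value 0 (by omega)
  push_cast at h9 h8 h7 h6 h5 h4 h3 h2 h1 h0
  simp only [List.cons.injEq]
  exact ⟨h9, h8, h7, h6, h5, h4, h3, h2, h1, h0, trivial⟩
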